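-- pv_equiv track=rewrite | github.com/rhc716/algorithm | 프로그래머스/lv2/92342. 양궁대회/양궁대회.py | solution
-- ===== SOURCE A (Python) =====
-- from itertools import product
--
-- def solution(n, info):
--     res = [-1]
--     max_gap = 0
--     for win_ryan in product([True, False], repeat=11):
--         info_ryan = [info[i] + 1 if win_ryan[i] else 0 for i in range(11)]
--         if sum(info_ryan) <= n:
--             score_ryan = sum([10 - i for i in range(11) if win_ryan[i]])
--             score_apeach = sum([10 - i for i in range(11) if not win_ryan[i] and info[i]])
--             gap = score_ryan - score_apeach
--             if gap > 0 and gap >= max_gap: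
--                 info_ryan[-1] += n - sum(info_ryan)
--                 if gap == max_gap:
--                     for i, j in zip(info_ryan[::-1], res[::-1]):
--                         if i < j:
--                             break
--                         elif i > j:
--                             res = info_ryan
--                             break
--                 else:
--                     max_gap = gap
--                     res = info_ryan
--     return res
-- ===== SOURCE B (Python) =====
-- def solution(n, info):
--     # Recursive DFS over rings 0..10 carrying arrows used, both partial scores and the
--     # partial allocation; a single (gap, allocation) best is kept with A's exact tie-break.
--     best = None  # (gap, alloc)
--
--     def beats(cand, cur):
--         for a, b in zip(reversed(cand), reversed(cur)):
--             if a != b: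
--                 return a > b
--         return False
--
--     def dfs(i, used, ryan, apeach, alloc):
--         nonlocal best
--         if i == 11:
--             if used > n:
--                 return
--             alloc = alloc[:10] + [alloc[10] + (n - used)]
--             gap = ryan - apeach
--             if gap <= 0:
--                 return
--             if best is None or gap > best[0] or (gap == best[0] and beats(alloc, best[1])):
--                 best = (gap, alloc)
--             return
--         dfs(i + 1, used + info[i] + 1, ryan + 10 - i, apeach, alloc + [info[i] + 1])
--         dfs(i + 1, used, ryan, apeach + (10 - i if info[i] else 0), alloc + [0])
--
--     dfs(0, 0, 0, 0, [])
--     return [-1] if best is None else best[1]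
-- ===== Notes on version B (the rewrite author's own statement) =====
-- stated objective: alternative
-- what changed: A materialises all 2^11 win/lose tuples with itertools.product and rebuilds each candidate allocation and both scores from scratch via range(11) comprehensions; B is a recursive DFS over ring indices that carries arrows used, both partial scores and the partial allocation as accumulators, keeping a single (gap, allocation) best with A's exact tie-break.
import Mathlib
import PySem

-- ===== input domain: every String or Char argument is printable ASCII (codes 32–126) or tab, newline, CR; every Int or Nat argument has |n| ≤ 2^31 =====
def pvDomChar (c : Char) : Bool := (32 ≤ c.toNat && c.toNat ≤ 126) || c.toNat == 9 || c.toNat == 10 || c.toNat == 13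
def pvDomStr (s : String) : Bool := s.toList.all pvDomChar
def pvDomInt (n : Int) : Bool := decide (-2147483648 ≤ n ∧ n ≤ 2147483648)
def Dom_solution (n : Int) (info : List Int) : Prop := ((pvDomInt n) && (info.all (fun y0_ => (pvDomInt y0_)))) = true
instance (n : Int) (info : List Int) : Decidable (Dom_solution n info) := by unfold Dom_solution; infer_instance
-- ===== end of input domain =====

-- B replaces A's materialised 2^11 product enumeration (rebuilding each candidate list and
-- recomputing sums per candidate) by a recursive DFS over ring indices that carries the arrows
-- used, both partial scores and the partial allocation; same return value (alternative decomposition).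


-- ===== PORT A =====
-- product([True, False], repeat=k), in itertools order (last coordinate varies fastest)
def pyProduct2 : Nat → List (List Bool)
  | 0 => [[]]
  | k+1 => [true, false].flatMap (fun x => (pyProduct2 k).map (fun t => x :: t))

-- the `for i, j in zip(info_ryan[::-1], res[::-1])` break loop: returns the new res
def tieLoop (res cand : List Int) : List (Int × Int) → List Int
  | [] => res
  | (i, j) :: rest => if i < j then res else if i > j then cand else tieLoop res cand rest

-- one iteration of A's `for win_ryan in product(...)` body, state = (res, max_gap)
-- info[i] is ported as getD (exact on Pre_solution: info has ≥ 11 entries, so no IndexError);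
-- info_ryan[-1] is index 10 of a length-11 list, ported as set 10 / getD 10.
def stepA (n : Int) (info : List Int) (st : List Int × Int) (win : List Bool) : List Int × Int :=
  let info_ryan := (List.range 11).map (fun i => if win.getD i false then info.getD i 0 + 1 else 0)
  if info_ryan.sum ≤ n then
    let score_ryan := (((List.range 11).filter (fun i => win.getD i false)).map
        (fun (i : Nat) => (10 : Int) - (i : Int))).sum
    let score_apeach := (((List.range 11).filter
        (fun i => !(win.getD i false) && (info.getD i 0 != 0))).map
        (fun (i : Nat) => (10 : Int) - (i : Int))).sum
    let gap := score_ryan - score_apeach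
    if gap > 0 ∧ gap ≥ st.2 then
      let info_ryan' := info_ryan.set 10 (info_ryan.getD 10 0 + (n - info_ryan.sum))
      if gap = st.2 then (tieLoop st.1 info_ryan' (info_ryan'.reverse.zip st.1.reverse), st.2)
      else (info_ryan', gap)
    else st
  else st

def solution (n : Int) (info : List Int) : List Int :=
  ((pyProduct2 11).foldl (stepA n info) ([-1], 0)).1

-- ===== PORT B =====
-- the first-difference comparison on the reversed lists (B's `beats`)
def beatsB : List (Int × Int) → Bool
  | [] => false
  | (a, b) :: rest => if a ≠ b then decide (a > b) else beatsB rest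

-- B's dfs; info[i] as getD (exact on Pre_solution), alloc[:10]/alloc[10] exact: alloc has 11
-- entries whenever i = 11 (one appended per ring).
def dfsB (n : Int) (info : List Int) (i : Nat) (used ryan apeach : Int)
    (alloc : List Int) (best : Option (Int × List Int)) : Option (Int × List Int) :=
  if _h : i < 11 then
    let b1 := dfsB n info (i+1) (used + info.getD i 0 + 1) (ryan + (10 - (i : Int))) apeach
                (alloc ++ [info.getD i 0 + 1]) best
    dfsB n info (i+1) used ryan (apeach + (if info.getD i 0 ≠ 0 then 10 - (i : Int) else 0))
      (alloc ++ [0]) b1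
  else
    if used > n then best
    else
      let alloc' := alloc.take 10 ++ [alloc.getD 10 0 + (n - used)]
      let gap := ryan - apeach
      if gap ≤ 0 then best
      else
        match best with
        | none => some (gap, alloc')
        | some (g, a) =>
          if gap > g ∨ (gap = g ∧ beatsB (alloc'.reverse.zip a.reverse)) then some (gap, alloc')
          else best
termination_by 11 - i

def solution_alt (n : Int) (info : List Int) : List Int :=
  match dfsB n info 0 0 0 0 [] none with
  | none => [-1]
  | some (_, a) => a

-- ===== PRECONDITION & SPEC =====
-- Pre_ excludes exactly the inputs where the Python A raises IndexError (fewer than 11 entries).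
def Pre_solution (n : Int) (info : List Int) : Prop := 11 ≤ info.length
instance (n : Int) (info : List Int) : Decidable (Pre_solution n info) := by
  unfold Pre_solution; infer_instance

def pvWitness_solution : Int × List Int := (5, [2, 1, 1, 1, 0, 0, 0, 0, 0, 0, 0])

def Spec_solution (n : Int) (info : List Int) (out : List Int) : Prop := out = solution_alt n info
instance (n : Int) (info : List Int) (out : List Int) : Decidable (Spec_solution n info out) := by
  unfold Spec_solution; infer_instance

-- ===== CLAIM (what is proved, stated in full; the proofs are below) =====
def Claim_equal_solution : Prop :=
  ∀ (n : Int) (info : List Int), Dom_solution n info → Pre_solution n info →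
    Spec_solution n info (solution n info)

-- ===== LEMMAS AND PROOFS =====

-- the leaf body of dfsB, factored for the proofs
def dfsLeaf (n : Int) (used ryan apeach : Int) (alloc : List Int)
    (best : Option (Int × List Int)) : Option (Int × List Int) :=
  if used > n then best
  else
    let alloc' := alloc.take 10 ++ [alloc.getD 10 0 + (n - used)]
    let gap := ryan - apeach
    if gap ≤ 0 then best
    else
      match best with
      | none => some (gap, alloc')
      | some (g, a) =>
        if gap > g ∨ (gap = g ∧ beatsB (alloc'.reverse.zip a.reverse)) then some (gap, alloc')
        else best

-- generic recursion over a choice vector with a running ring index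
def recSum (g : Nat → Bool → Int) : List Bool → Nat → Int
  | [], _ => 0
  | b :: t, s => g s b + recSum g t (s+1)

def recList (g : Nat → Bool → Int) : List Bool → Nat → List Int
  | [], _ => []
  | b :: t, s => g s b :: recList g t (s+1)

def gAlloc (info : List Int) (s : Nat) (b : Bool) : Int := if b then info.getD s 0 + 1 else 0
def gRyan (s : Nat) (b : Bool) : Int := if b then (10 : Int) - (s : Int) else 0
def gApeach (info : List Int) (s : Nat) (b : Bool) : Int :=
  if !b && (info.getD s 0 != 0) then (10 : Int) - (s : Int) else 0

def allocOf (info : List Int) (t : List Bool) : List Int := recList (gAlloc info) t 0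

-- the common per-candidate step both folds are reduced to
def leafStep (n : Int) (info : List Int) (best : Option (Int × List Int)) (t : List Bool) :
    Option (Int × List Int) :=
  dfsLeaf n ((allocOf info t).sum) (recSum gRyan t 0) (recSum (gApeach info) t 0)
    (allocOf info t) best

-- the A-state view of a B-state
def phi : Option (Int × List Int) → List Int × Int
  | none => ([-1], 0)
  | some (g, a) => (a, g)

theorem dfsB_at_leaf (n : Int) (info : List Int) (used ryan apeach : Int)
    (alloc : List Int) (best : Option (Int × List Int)) :
    dfsB n info 11 used ryan apeach alloc best = dfsLeaf n used ryan apeach alloc best := by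
  rw [dfsB]; simp [dfsLeaf]

theorem recList_length (g : Nat → Bool → Int) (t : List Bool) (s : Nat) :
    (recList g t s).length = t.length := by
  induction t generalizing s with
  | nil => simp [recList]
  | cons b t ih => simp [recList, ih]

theorem recList_range (g : Nat → Bool → Int) (t : List Bool) (s : Nat) :
    (List.range t.length).map (fun j => g (s + j) (t.getD j false)) = recList g t s := by
  induction t generalizing s with
  | nil => simp [recList]
  | cons b t ih =>
    have htail : List.map ((fun j => g (s + j) ((b :: t).getD j false)) ∘ Nat.succ)
        (List.range t.length) = recList g t (s + 1) := by
      rw [← ih (s+1)]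
      apply List.map_congr_left
      intro j _
      simp only [Function.comp_apply, List.getD_cons_succ]
      congr 1
      omega
    simp only [List.length_cons, List.range_succ_eq_map, List.map_cons, List.map_map, recList,
      htail, Nat.add_zero, List.getD_cons_zero]

theorem recSum_range (g : Nat → Bool → Int) (t : List Bool) (s : Nat) :
    ((List.range t.length).map (fun j => g (s + j) (t.getD j false))).sum = recSum g t s := by
  induction t generalizing s with
  | nil => simp [recSum]
  | cons b t ih =>
    have htail : List.map ((fun j => g (s + j) ((b :: t).getD j false)) ∘ Nat.succ)
        (List.range t.length) = List.map (fun j => g (s + 1 + j) (t.getD j false))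
          (List.range t.length) := by
      apply List.map_congr_left
      intro j _
      simp only [Function.comp_apply, List.getD_cons_succ]
      congr 1
      omega
    simp only [List.length_cons, List.range_succ_eq_map, List.map_cons, List.map_map,
      List.sum_cons, recSum, htail, ih (s+1), Nat.add_zero, List.getD_cons_zero]

theorem sum_filter_map (l : List Nat) (p : Nat → Bool) (f : Nat → Int) :
    ((l.filter p).map f).sum = (l.map (fun i => if p i then f i else 0)).sum := by
  induction l with
  | nil => simp
  | cons a l ih =>
    by_cases h : p a <;> simp [List.filter_cons, h, ih]

theorem tieLoop_beats (res cand : List Int) (z : List (Int × Int)) :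
    tieLoop res cand z = if beatsB z then cand else res := by
  induction z with
  | nil => simp [tieLoop, beatsB]
  | cons p rest ih =>
    obtain ⟨a, b⟩ := p
    simp only [tieLoop, beatsB, ih]
    rcases lt_trichotomy a b with h | h | h
    · have h1 : a ≠ b := ne_of_lt h
      have h2 : ¬ a > b := not_lt_of_gt h
      simp [h, h1, h2]
    · simp [h]
    · have h1 : a ≠ b := ne_of_gt h
      simp [not_lt_of_gt h, h, h1]

-- the per-candidate correspondence: A's loop body = phi-image of B's leaf step
theorem stepA_leafStep (n : Int) (info : List Int) (t : List Bool) (ht : t.length = 11)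
    (b : Option (Int × List Int)) :
    stepA n info (phi b) t = phi (leafStep n info b t) := by
  have halloc : (List.range 11).map (fun i => if t.getD i false then info.getD i 0 + 1 else 0)
      = allocOf info t := by
    simp only [allocOf]
    rw [← ht, ← recList_range (gAlloc info) t 0]
    apply List.map_congr_left; intro j _; simp [gAlloc]
  have hryan : (((List.range 11).filter (fun i => t.getD i false)).map
      (fun (i : Nat) => (10 : Int) - (i : Int))).sum = recSum gRyan t 0 := by
    rw [sum_filter_map, ← ht, ← recSum_range gRyan t 0]
    congr 1; apply List.map_congr_left; intro j _; simp [gRyan]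
  have hapeach : (((List.range 11).filter
      (fun i => !(t.getD i false) && (info.getD i 0 != 0))).map
      (fun (i : Nat) => (10 : Int) - (i : Int))).sum = recSum (gApeach info) t 0 := by
    rw [sum_filter_map, ← ht, ← recSum_range (gApeach info) t 0]
    congr 1; apply List.map_congr_left; intro j _; simp [gApeach]
  have hlen : (allocOf info t).length = 11 := by rw [allocOf, recList_length, ht]
  have hset : ∀ v : Int, (allocOf info t).set 10 v = (allocOf info t).take 10 ++ [v] := by
    intro v
    rw [List.set_eq_take_append_cons_drop, List.drop_eq_nil_of_le (by omega)]
    simp [hlen]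
  unfold stepA leafStep dfsLeaf
  rw [halloc, hryan, hapeach]
  generalize hL : allocOf info t = L at hset ⊢
  generalize recSum gRyan t 0 = R
  generalize recSum (gApeach info) t 0 = P
  by_cases hsum : L.sum ≤ n
  · have h2 : ¬ L.sum > n := by omega
    simp only [if_pos hsum, if_neg h2]
    by_cases hpos : R - P > 0
    · have hnle : ¬ (R - P ≤ 0) := by omega
      cases b with
      | none =>
        simp only [phi]
        have hc : R - P > 0 ∧ R - P ≥ 0 := ⟨hpos, by omega⟩
        have hne : ¬ (R - P = 0) := by omega
        simp only [if_pos hc, if_neg hne, if_neg hnle, hset]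
      | some pr =>
        obtain ⟨g, a⟩ := pr
        simp only [phi]
        rcases lt_trichotomy (R - P) g with h | h | h
        · have hcA : ¬ (R - P > 0 ∧ R - P ≥ g) := by omega
          have hcB : ¬ (R - P > g ∨ (R - P = g ∧
              beatsB ((L.take 10 ++ [L.getD 10 0 + (n - L.sum)]).reverse.zip a.reverse)
                = true)) := by
            rintro (h' | ⟨h', _⟩) <;> omega
          simp only [if_neg hcA, if_neg hnle, if_neg hcB, phi]
        · have hcA : R - P > 0 ∧ R - P ≥ g := ⟨hpos, by omega⟩
          rw [if_pos hcA, if_pos h, if_neg hnle, hset, tieLoop_beats]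
          by_cases hb : beatsB ((L.take 10 ++ [L.getD 10 0 + (n - L.sum)]).reverse.zip a.reverse)
              = true
          · rw [if_pos hb, if_pos (Or.inr ⟨h, hb⟩ : R - P > g ∨ (R - P = g ∧
              beatsB ((L.take 10 ++ [L.getD 10 0 + (n - L.sum)]).reverse.zip a.reverse) = true))]
            simp [h]
          · have hcB : ¬ (R - P > g ∨ (R - P = g ∧
                beatsB ((L.take 10 ++ [L.getD 10 0 + (n - L.sum)]).reverse.zip a.reverse)
                  = true)) := by
              rintro (h' | ⟨_, h''⟩)
              · omega
              · exact hb h''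
            rw [if_neg hb, if_neg hcB]
        · have hcA : R - P > 0 ∧ R - P ≥ g := ⟨hpos, by omega⟩
          have hne : ¬ (R - P = g) := by omega
          have hcB : R - P > g ∨ (R - P = g ∧
              beatsB ((L.take 10 ++ [L.getD 10 0 + (n - L.sum)]).reverse.zip a.reverse)
                = true) := Or.inl h
          simp only [if_pos hcA, if_neg hne, if_neg hnle, if_pos hcB, hset, phi]
    · have hle : R - P ≤ 0 := by omega
      cases b with
      | none =>
        simp only [phi]
        have hcA : ¬ (R - P > 0 ∧ R - P ≥ 0) := by omega
        simp only [if_neg hcA, if_pos hle, phi]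
      | some pr =>
        obtain ⟨g, a⟩ := pr
        simp only [phi]
        have hcA : ¬ (R - P > 0 ∧ R - P ≥ g) := by omega
        simp only [if_neg hcA, if_pos hle, phi]
  · have h2 : L.sum > n := by omega
    simp only [if_neg hsum, if_pos h2]

-- the DFS computes the fold of leafStep over all completions
theorem dfsB_fold (n : Int) (info : List Int) :
    ∀ (k i : Nat), i + k = 11 →
      ∀ (used ryan apeach : Int) (alloc : List Int) (best : Option (Int × List Int)),
        dfsB n info i used ryan apeach alloc best
          = (pyProduct2 k).foldl
              (fun b t => dfsLeaf n (used + (recList (gAlloc info) t i).sum)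
                (ryan + recSum gRyan t i) (apeach + recSum (gApeach info) t i)
                (alloc ++ recList (gAlloc info) t i) b) best := by
  intro k
  induction k with
  | zero =>
    intro i hi used ryan apeach alloc best
    have : i = 11 := by omega
    subst this
    rw [dfsB_at_leaf]
    simp [pyProduct2, recList, recSum]
  | succ k ih =>
    intro i hi used ryan apeach alloc best
    have hlt : i < 11 := by omega
    rw [dfsB]
    simp only [hlt, dite_true, if_pos]
    rw [ih (i+1) (by omega), ih (i+1) (by omega)]
    show _ = (pyProduct2 (k+1)).foldl _ best
    rw [pyProduct2]
    simp only [List.flatMap_cons, List.flatMap_nil, List.append_nil, List.foldl_append,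
      List.foldl_map]
    congr 1
    · -- false branch (outer fold): functions agree
      funext b t
      simp only [recList, recSum, gAlloc, gRyan, gApeach, if_neg, Bool.not_false, Bool.true_and]
      congr 1
      · simp
      · simp
      · by_cases h : info.getD i 0 = 0 <;>
          simp [gApeach, bne_iff_ne, h, add_assoc]
      · simp
    · -- true branch (inner fold)
      congr 1
      funext b t
      simp only [recList, recSum, gAlloc, gRyan, gApeach]
      congr 1
      · simp; ring
      · simp; ring
      · simp
      · simp

theorem foldl_phi (n : Int) (info : List Int) (l : List (List Bool))
    (hl : ∀ t ∈ l, t.length = 11) (b : Option (Int × List Int)) :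
    l.foldl (stepA n info) (phi b) = phi (l.foldl (leafStep n info) b) := by
  induction l generalizing b with
  | nil => simp
  | cons t l ih =>
    simp only [List.foldl_cons]
    rw [stepA_leafStep n info t (hl t (by simp)) b]
    exact ih (fun t ht => hl t (by simp [ht])) _

theorem pyProduct2_length (k : Nat) : ∀ t ∈ pyProduct2 k, t.length = k := by
  induction k with
  | zero => intro t ht; simp [pyProduct2] at ht; simp [ht]
  | succ k ih =>
    intro t ht
    simp [pyProduct2, List.mem_flatMap] at ht
    rcases ht with ⟨u, hu, h⟩ | ⟨u, hu, h⟩ <;> subst h <;> simp [ih u hu]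

-- ===== VERDICT (by name: the statement is the Claim_ definition above) =====
theorem solution_spec : Claim_equal_solution := by
  intro n info _ _
  unfold Spec_solution solution solution_alt
  rw [dfsB_fold n info 11 0 (by omega)]
  have hfun : (fun (b : Option (Int × List Int)) (t : List Bool) =>
      dfsLeaf n (0 + (recList (gAlloc info) t 0).sum) (0 + recSum gRyan t 0)
        (0 + recSum (gApeach info) t 0) ([] ++ recList (gAlloc info) t 0) b)
      = leafStep n info := by
    funext b t
    simp [leafStep, allocOf]
  rw [hfun]
  have := foldl_phi n info (pyProduct2 11) (pyProduct2_length 11) none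
  have hphi : ([-1], (0:Int)) = phi none := rfl
  rw [hphi, this]
  cases h : (pyProduct2 11).foldl (leafStep n info) none with
  | none => simp [phi]
  | some pr => obtain ⟨g, a⟩ := pr; simp [phi]
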